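-- pv_equiv track=rewrite | github.com/Qawes/DOEsim | widgets/helpers.py | generate_unique_default_name
-- ===== SOURCE A (Python) =====
-- from typing import Iterable, Optional
--
-- def generate_unique_default_name(base_type: str, existing: Iterable[str]) -> str:
--     i = 1
--     existing_set = set([str(x) for x in existing])
--     while True:
--         candidate = f"{base_type} {i}"
--         if candidate not in existing_set:
--             return candidate
--         i += 1
-- ===== SOURCE B (Python) =====
-- def _parse_index(prefix, name):
--     """Return n if name == prefix + canonical decimal of n (n >= 1), else None."""
--     if not name.startswith(prefix):
--         return None
--     suffix = name[len(prefix):]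
--     if not suffix or suffix[0] == "0":
--         return None
--     n = 0
--     for ch in suffix:
--         if not ("0" <= ch <= "9"):
--             return None
--         n = 10 * n + (ord(ch) - 48)
--     return n
--
--
-- def generate_unique_default_name(base_type, existing):
--     prefix = base_type + " "
--     used = set()
--     for name in existing:
--         n = _parse_index(prefix, name)
--         if n is not None:
--             used.add(n)
--     i = 1
--     while i in used:
--         i += 1
--     return prefix + str(i)
-- ===== Notes on version B (the rewrite author's own statement) =====
-- stated objective: alternative
-- what changed: A repeatedly formats candidate names and probes them against a set of the existing name strings; B makes one parsing pass that strips the 'base_type ' prefix and collects the canonical integer suffixes into a set of used indices, then scans the integers from 1 for the first free index.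
import Mathlib
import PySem

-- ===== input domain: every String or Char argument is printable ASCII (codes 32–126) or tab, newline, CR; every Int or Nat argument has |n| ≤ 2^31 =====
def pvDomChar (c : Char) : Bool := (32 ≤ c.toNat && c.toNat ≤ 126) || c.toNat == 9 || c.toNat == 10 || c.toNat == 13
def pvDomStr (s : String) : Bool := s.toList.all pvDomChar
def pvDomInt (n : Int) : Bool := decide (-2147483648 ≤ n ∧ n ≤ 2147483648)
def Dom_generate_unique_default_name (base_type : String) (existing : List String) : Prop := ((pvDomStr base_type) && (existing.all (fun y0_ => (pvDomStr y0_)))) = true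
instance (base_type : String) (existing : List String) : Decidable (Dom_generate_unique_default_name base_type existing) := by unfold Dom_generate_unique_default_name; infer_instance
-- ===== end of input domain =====

-- B replaces A's repeated probing of candidate strings against a set of names by one parsing
-- pass that collects the used integer suffixes and then scans for the smallest free index
-- (objective: alternative).

-- ===== PORT A =====
-- f"{base_type} {i}"
def pvCandidate (base_type : String) (i : Int) : String := base_type ++ " " ++ PySem.Int.toStr i

-- A's 'while True' loop; it always returns within existing.length + 1 iterations (the
-- candidates are pairwise distinct strings), so the fuel is only a termination guard.
def pvLoopA (base_type : String) (existing_set : PySem.Set String) (i : Int) : Nat → String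
  | 0 => pvCandidate base_type i
  | fuel + 1 =>
    let candidate := pvCandidate base_type i
    if PySem.Set.contains existing_set candidate then
      pvLoopA base_type existing_set (i + 1) fuel
    else candidate

def generate_unique_default_name (base_type : String) (existing : List String) : String :=
  let existing_set := PySem.Set.ofList (existing.map (fun x => x))  -- set([str(x) …]); str on a str is identity
  pvLoopA base_type existing_set 1 (existing.length + 1)

-- ===== PORT B =====
-- the digit-accumulating 'for ch in suffix' loop of _parse_index ('"0" <= ch <= "9"', n = 10*n + (ord(ch)-48))
def pvParseGo (n : Int) : List Char → Option Int
  | [] => some n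
  | c :: rest =>
    if '0' ≤ c ∧ c ≤ '9' then pvParseGo (10 * n + ((c.toNat : Int) - 48)) rest else none

-- _parse_index(prefix, name)
def pvParseIndex (pre : String) (name : String) : Option Int :=
  if PySem.Str.startswith name pre then
    -- suffix = name[len(prefix):]
    match PySem.List.slice name.toList (some (PySem.Str.len pre)) none with
    | [] => none                                                  -- 'not suffix'
    | c :: rest => if c = '0' then none else pvParseGo 0 (c :: rest)
  else none

-- B's 'while i in used' loop; same fuel guard as A's loop (it exits within existing.length + 1 steps)
def pvLoopB (pre : String) (used : PySem.Set Int) (i : Int) : Nat → String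
  | 0 => pre ++ PySem.Int.toStr i
  | fuel + 1 =>
    if PySem.Set.contains used i then pvLoopB pre used (i + 1) fuel
    else pre ++ PySem.Int.toStr i

def generate_unique_default_name_alt (base_type : String) (existing : List String) : String :=
  let pre := base_type ++ " "
  let used : PySem.Set Int := existing.foldl (fun used name =>
    match pvParseIndex pre name with
    | some n => PySem.Set.add used n
    | none => used) PySem.Set.empty
  pvLoopB pre used 1 (existing.length + 1)

-- ===== PRECONDITION & SPEC =====
def Spec_generate_unique_default_name (base_type : String) (existing : List String) (out : String) : Prop := out = generate_unique_default_name_alt base_type existing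
instance (base_type : String) (existing : List String) (out : String) : Decidable (Spec_generate_unique_default_name base_type existing out) := by unfold Spec_generate_unique_default_name; infer_instance

-- ===== CLAIM (what is proved, stated in full; the proofs are below) =====
def Claim_equal_generate_unique_default_name : Prop := ∀ (base_type : String) (existing : List String), Dom_generate_unique_default_name base_type existing → Spec_generate_unique_default_name base_type existing (generate_unique_default_name base_type existing)

-- ===== LEMMAS AND PROOFS =====

-- the value accumulated by B's digit loop (proof-only helper)
def pvVal (cs : List Char) : Int := cs.foldl (fun a c => 10 * a + ((c.toNat : Int) - 48)) 0

theorem pvGo_of_digits (cs : List Char) (n : Int)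
    (h : ∀ c ∈ cs, '0' ≤ c ∧ c ≤ '9') :
    pvParseGo n cs = some (cs.foldl (fun a c => 10 * a + ((c.toNat : Int) - 48)) n) := by
  induction cs generalizing n with
  | nil => rfl
  | cons c rest ih =>
    have hc := h c (by simp)
    simp only [pvParseGo, if_pos hc, List.foldl_cons]
    exact ih _ (fun d hd => h d (by simp [hd]))

theorem pvGo_eq_some (cs : List Char) (n v : Int)
    (h : pvParseGo n cs = some v) :
    (∀ c ∈ cs, '0' ≤ c ∧ c ≤ '9') ∧
      v = cs.foldl (fun a c => 10 * a + ((c.toNat : Int) - 48)) n := by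
  induction cs generalizing n with
  | nil => simpa [pvParseGo] using (Option.some.inj h).symm
  | cons c rest ih =>
    by_cases hc : '0' ≤ c ∧ c ≤ '9'
    · simp only [pvParseGo, if_pos hc] at h
      obtain ⟨h1, h2⟩ := ih _ h
      refine ⟨?_, by simpa [List.foldl_cons] using h2⟩
      intro d hd
      rcases List.mem_cons.mp hd with rfl | hd
      · exact hc
      · exact h1 d hd
    · simp [pvParseGo, hc] at h

theorem pvChar_bounds (c : Char) (h : '0' ≤ c ∧ c ≤ '9') :
    48 ≤ c.toNat ∧ c.toNat ≤ 57 := by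
  obtain ⟨h1, h2⟩ := h
  rw [Char.le_def, UInt32.le_iff_toNat_le] at h1 h2
  exact ⟨h1, h2⟩

theorem pvChar_eq_of_toNat (c d : Char) (h : c.toNat = d.toNat) : c = d :=
  Char.ext (UInt32.toNat_inj.mp h)

theorem pvDigitChar_toNat (d : Nat) (h : d < 10) :
    ('0' ≤ Nat.digitChar d ∧ Nat.digitChar d ≤ '9') ∧ (Nat.digitChar d).toNat = 48 + d := by
  interval_cases d <;> exact ⟨⟨by decide, by decide⟩, by decide⟩

theorem pvChar_digitChar (c : Char) (h : '0' ≤ c ∧ c ≤ '9') :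
    c.toNat - 48 < 10 ∧ Nat.digitChar (c.toNat - 48) = c := by
  obtain ⟨h48, h57⟩ := pvChar_bounds c h
  refine ⟨by omega, ?_⟩
  apply pvChar_eq_of_toNat
  rw [(pvDigitChar_toNat (c.toNat - 48) (by omega)).2]
  omega

theorem pvVal_toDigits (m : Nat) : pvVal (Nat.toDigits 10 m) = (m : Int) := by
  induction m using Nat.strong_induction_on with
  | _ m ih =>
    rcases Nat.lt_or_ge m 10 with hm | hm
    · rw [Nat.toDigits_of_lt_base hm]
      have hdc := (pvDigitChar_toNat m hm).2
      simp only [pvVal, List.foldl_cons, List.foldl_nil, hdc]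
      push_cast
      ring
    · rw [Nat.toDigits_of_base_le (by norm_num) hm]
      have ihv := ih (m / 10) (Nat.div_lt_self (by omega) (by norm_num))
      have hdc := (pvDigitChar_toNat (m % 10) (Nat.mod_lt _ (by norm_num))).2
      unfold pvVal at ihv ⊢
      rw [List.foldl_append, List.foldl_cons, List.foldl_nil, ihv, hdc]
      have := Nat.div_add_mod m 10
      push_cast
      omega

theorem pvDigits_toDigits (m : Nat) (c : Char) (h : c ∈ Nat.toDigits 10 m) :
    '0' ≤ c ∧ c ≤ '9' := by
  have hb := Nat.isDigit_of_mem_toDigits (by norm_num) (by norm_num) h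
  simp only [Char.isDigit, ge_iff_le, Bool.and_eq_true, decide_eq_true_eq] at hb
  exact ⟨Char.le_def.mpr hb.1, Char.le_def.mpr hb.2⟩

theorem pvHead_toDigits (m : Nat) (hm : 1 ≤ m) (c : Char) (rest : List Char)
    (h : Nat.toDigits 10 m = c :: rest) : c ≠ '0' := by
  induction m using Nat.strong_induction_on generalizing c rest with
  | _ m ih =>
    rcases Nat.lt_or_ge m 10 with hlt | hge
    · rw [Nat.toDigits_of_lt_base hlt] at h
      obtain ⟨rfl, -⟩ := List.cons.inj h
      interval_cases m <;> decide
    · rw [Nat.toDigits_of_base_le (by norm_num) hge] at h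
      obtain ⟨c', rest', hcr⟩ : ∃ c' rest', Nat.toDigits 10 (m / 10) = c' :: rest' := by
        cases hh : Nat.toDigits 10 (m / 10) with
        | nil => exact absurd (hh ▸ @Nat.length_toDigits_pos 10 (m / 10)) (by simp)
        | cons a b => exact ⟨a, b, rfl⟩
      rw [hcr] at h
      simp only [List.cons_append] at h
      obtain ⟨rfl, -⟩ := List.cons.inj h
      exact ih (m / 10) (Nat.div_lt_self (by omega) (by norm_num)) (by omega) c' rest' hcr

theorem pvCanon (cs : List Char) (hdig : ∀ c ∈ cs, '0' ≤ c ∧ c ≤ '9')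
    (c₀ : Char) (tl : List Char) (hcs : cs = c₀ :: tl) (h0 : c₀ ≠ '0') :
    1 ≤ pvVal cs ∧ cs = Nat.toDigits 10 (pvVal cs).toNat := by
  induction cs using List.reverseRecOn generalizing c₀ tl with
  | nil => simp at hcs
  | append_singleton ds c ihds =>
    have hc : '0' ≤ c ∧ c ≤ '9' := hdig c (by simp)
    obtain ⟨hc48, hc57⟩ := pvChar_bounds c hc
    cases ds with
    | nil =>
      simp only [List.nil_append] at hcs ⊢
      obtain ⟨rfl, rfl⟩ : c = c₀ ∧ [] = tl := List.cons.inj hcs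
      have hne : c.toNat ≠ 48 := by
        intro hEq
        exact h0 (pvChar_eq_of_toNat c '0' (by rw [hEq]; decide))
      have hval : pvVal [c] = ((c.toNat : Int) - 48) := by
        simp [pvVal]
      constructor
      · rw [hval]; omega
      · rw [hval]
        have htn : (((c.toNat : Int) - 48)).toNat = c.toNat - 48 := by omega
        rw [htn, Nat.toDigits_of_lt_base (by omega)]
        rw [(pvChar_digitChar c hc).2]
    | cons a as =>
      obtain ⟨ha, -⟩ := List.cons.inj (show a :: (as ++ [c]) = c₀ :: tl by simpa using hcs)
      subst ha
      obtain ⟨hv1, hvEq⟩ := ihds (fun d hd => hdig d (List.mem_append_left _ hd)) a as rfl h0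
      have hvapp : pvVal ((a :: as) ++ [c]) =
          10 * pvVal (a :: as) + ((c.toNat : Int) - 48) := by
        simp [pvVal, List.foldl_append]
      set v := pvVal (a :: as) with hv
      have hvtn : (10 * v + ((c.toNat : Int) - 48)).toNat = 10 * v.toNat + (c.toNat - 48) := by
        omega
      constructor
      · rw [hvapp]; omega
      · rw [hvapp, hvtn, Nat.toDigits_of_base_le (by norm_num) (by omega)]
        have hdiv : (10 * v.toNat + (c.toNat - 48)) / 10 = v.toNat := by omega
        have hmod : (10 * v.toNat + (c.toNat - 48)) % 10 = c.toNat - 48 := by omega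
        rw [hdiv, hmod, (pvChar_digitChar c hc).2, ← hvEq]

-- toChars of a positive int is Nat.toDigits of its absolute value
theorem pvToChars_pos (i : Int) (hi : 1 ≤ i) :
    PySem.Int.toChars i = Nat.toDigits 10 i.toNat := by
  simp [PySem.Int.toChars, show ¬ i < 0 by omega]

theorem pvCandidate_toList (base : String) (i : Int) :
    (pvCandidate base i).toList = (base ++ " ").toList ++ PySem.Int.toChars i := by
  simp [pvCandidate, String.toList_append, PySem.Int.toList_toStr]

-- x parses to n exactly when x is pre followed by the canonical decimal of some n ≥ 1
theorem pvParse_sound (pre x : String) (n : Int) (h : pvParseIndex pre x = some n) :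
    1 ≤ n ∧ x.toList = pre.toList ++ PySem.Int.toChars n := by
  unfold pvParseIndex at h
  by_cases hsw : PySem.Str.startswith x pre = true
  · rw [if_pos hsw] at h
    have hpref : pre.toList <+: x.toList := by
      rw [PySem.Str.startswith_eq] at hsw
      exact (PySem.Chars.startswith_iff _ _).mp hsw
    have hx : pre.toList ++ x.toList.drop pre.toList.length = x.toList :=
      List.prefix_iff_eq_append.mp hpref
    rw [PySem.Str.len_eq, PySem.List.slice_from_natCast] at h
    cases hd : x.toList.drop pre.toList.length with
    | nil =>
      rw [hd] at h
      exact absurd (h : (none : Option Int) = some n) (by simp)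
    | cons c rest =>
      rw [hd] at h
      have h' : (if c = '0' then none else pvParseGo 0 (c :: rest)) = some n := h
      by_cases hc0 : c = '0'
      · rw [if_pos hc0] at h'; exact absurd h' (by simp)
      · rw [if_neg hc0] at h'
        obtain ⟨hdig, hval⟩ := pvGo_eq_some _ _ _ h'
        obtain ⟨h1, hcanon⟩ := pvCanon (c :: rest) hdig c rest rfl hc0
        have hn : n = pvVal (c :: rest) := by simpa [pvVal] using hval
        refine ⟨hn ▸ h1, ?_⟩
        rw [pvToChars_pos n (hn ▸ h1), ← hx, hd, hn, ← hcanon]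
  · rw [if_neg hsw] at h; exact absurd h (by simp)

theorem pvParse_complete (base : String) (i : Int) (hi : 1 ≤ i) :
    pvParseIndex (base ++ " ") (pvCandidate base i) = some i := by
  have htl := pvCandidate_toList base i
  have htd := pvToChars_pos i hi
  have hsw : PySem.Str.startswith (pvCandidate base i) (base ++ " ") = true := by
    rw [PySem.Str.startswith_eq]
    exact (PySem.Chars.startswith_iff _ _).mpr ⟨_, htl.symm⟩
  unfold pvParseIndex
  rw [if_pos hsw, PySem.Str.len_eq, PySem.List.slice_from_natCast, htl,
    List.drop_left, htd]
  obtain ⟨c, rest, hcr⟩ : ∃ c rest, Nat.toDigits 10 i.toNat = c :: rest := by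
    cases hh : Nat.toDigits 10 i.toNat with
    | nil => exact absurd (hh ▸ @Nat.length_toDigits_pos 10 i.toNat) (by simp)
    | cons a b => exact ⟨a, b, rfl⟩
  rw [hcr]
  have hc0 : c ≠ '0' := pvHead_toDigits i.toNat (by omega) c rest hcr
  show (if c = '0' then none else pvParseGo 0 (c :: rest)) = some i
  rw [if_neg hc0, ← hcr,
    pvGo_of_digits _ _ (fun d hd => pvDigits_toDigits i.toNat d hd)]
  have : pvVal (Nat.toDigits 10 i.toNat) = (i.toNat : Int) := pvVal_toDigits i.toNat
  simp only [pvVal] at this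
  rw [this, Int.toNat_of_nonneg (by omega)]

theorem pvMem_build (pre : String) (l : List String) (s : PySem.Set Int) (n : Int) :
    (n ∈ l.foldl (fun used name =>
      match pvParseIndex pre name with
      | some m => PySem.Set.add used m
      | none => used) s) ↔ n ∈ s ∨ ∃ x ∈ l, pvParseIndex pre x = some n := by
  induction l generalizing s with
  | nil => simp
  | cons x l ih =>
    cases hx : pvParseIndex pre x with
    | none =>
      simp only [List.foldl_cons, hx]
      rw [ih]
      constructor
      · rintro (hs | ⟨y, hy, hp⟩)
        · exact Or.inl hs
        · exact Or.inr ⟨y, List.mem_cons_of_mem _ hy, hp⟩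
      · rintro (hs | ⟨y, hy, hp⟩)
        · exact Or.inl hs
        · rcases List.mem_cons.mp hy with rfl | hy
          · rw [hx] at hp; exact absurd hp (by simp)
          · exact Or.inr ⟨y, hy, hp⟩
    | some m =>
      simp only [List.foldl_cons, hx]
      rw [ih, PySem.Set.mem_add]
      constructor
      · rintro ((hs | rfl) | ⟨y, hy, hp⟩)
        · exact Or.inl hs
        · exact Or.inr ⟨x, List.mem_cons_self .., hx⟩
        · exact Or.inr ⟨y, List.mem_cons_of_mem _ hy, hp⟩
      · rintro (hs | ⟨y, hy, hp⟩)
        · exact Or.inl (Or.inl hs)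
        · rcases List.mem_cons.mp hy with rfl | hy
          · rw [hx] at hp
            exact Or.inl (Or.inr (Option.some.inj hp).symm)
          · exact Or.inr ⟨y, hy, hp⟩

theorem pvLoop_eq (base : String) (eset : PySem.Set String) (used : PySem.Set Int)
    (hmem : ∀ j : Int, 1 ≤ j →
      PySem.Set.contains eset (pvCandidate base j) = PySem.Set.contains used j) :
    ∀ (fuel : Nat) (i : Int), 1 ≤ i →
      pvLoopA base eset i fuel = pvLoopB (base ++ " ") used i fuel := by
  intro fuel
  induction fuel with
  | zero =>
    intro i _
    simp [pvLoopA, pvLoopB, pvCandidate, String.append_assoc]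
  | succ fuel ih =>
    intro i hi
    simp only [pvLoopA, pvLoopB, hmem i hi]
    rw [ih (i + 1) (by omega)]
    simp only [pvCandidate, String.append_assoc]

-- ===== VERDICT (by name: the statement is the Claim_ definition above) =====
theorem generate_unique_default_name_spec : Claim_equal_generate_unique_default_name := by
  intro base existing _
  unfold Spec_generate_unique_default_name generate_unique_default_name
    generate_unique_default_name_alt
  apply pvLoop_eq
  intro j hj
  rw [Bool.eq_iff_iff, PySem.Set.contains_iff, PySem.Set.contains_iff,
    PySem.Set.mem_ofList, pvMem_build]
  simp only [List.map_id', PySem.Set.empty, List.not_mem_nil, false_or]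
  constructor
  · intro hm
    exact ⟨_, hm, pvParse_complete base j hj⟩
  · rintro ⟨x, hx, hp⟩
    obtain ⟨-, hEq⟩ := pvParse_sound _ _ _ hp
    have hxc : x = pvCandidate base j :=
      String.toList_inj.mp (by rw [hEq, pvCandidate_toList])
    exact hxc ▸ hx
  · norm_num
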